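-- pv_equiv track=rewrite | github.com/JerBast/advent-of-code | 2024/day21.py | path_d_rec
-- ===== SOURCE A (Python) =====
-- D_LOCS = {
--     '^': (1, 0),
--     'A': (2, 0),
--     '<': (0, 1),
--     'v': (1, 1),
--     '>': (2, 1)
-- }
--
-- MEM = {}
--
-- def travel_d(c: str, t: str) -> str:
--     cx, cy = D_LOCS[c]
--     tx, ty = D_LOCS[t]
--     r = '>' * max(0, tx - cx)
--     d = 'v' * max(0, ty - cy)
--     u = '^' * max(0, cy - ty)
--     l = '<' * max(0, cx - tx)
--     return (l + d if tx > 0 or cy > 0 else d + l) + (u + r if cx > 0 else r + u)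
--
-- def path_d_rec(s: str, depth: int) -> int:
--     if depth == 0:
--         return len(s)
--     length = 0
--     c = 'A'
--     for t in s:
--         if (c, t, depth) in MEM:
--             length += MEM[(c, t, depth)]
--         else:
--             sub_length = path_d_rec(travel_d(c, t) + 'A', depth - 1)
--             MEM[(c, t, depth)] = sub_length
--             length += sub_length
--         c = t
--     return length
-- ===== SOURCE B (Python) =====
-- D_LOCS = {
--     '^': (1, 0),
--     'A': (2, 0),
--     '<': (0, 1),
--     'v': (1, 1),
--     '>': (2, 1)
-- }
--
-- KEYS = '^A<v>'
--
-- def travel_d(c: str, t: str) -> str: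
--     cx, cy = D_LOCS[c]
--     tx, ty = D_LOCS[t]
--     r = '>' * max(0, tx - cx)
--     d = 'v' * max(0, ty - cy)
--     u = '^' * max(0, cy - ty)
--     l = '<' * max(0, cx - tx)
--     return (l + d if tx > 0 or cy > 0 else d + l) + (u + r if cx > 0 else r + u)
--
-- def path_d_rec(s: str, depth: int) -> int:
--     if depth == 0:
--         return len(s)
--     # bottom-up DP over per-transition costs
--     cost = {(c, t): len(travel_d(c, t)) + 1 for c in KEYS for t in KEYS}
--     for _ in range(depth - 1):
--         cost = {(c, t): sum(cost[p] for p in zip('A' + w, w))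
--                 for c in KEYS for t in KEYS
--                 for w in [travel_d(c, t) + 'A']}
--     return sum(cost[p] for p in zip('A' + s, s))
-- ===== Notes on version B (the rewrite author's own statement) =====
-- stated objective: alternative
-- what changed: Replaces the top-down memoized recursion over expanded strings by a bottom-up DP that iterates a 25-entry per-transition cost table depth-1 times and sums it over the pairs of 'A'+s; no recursion and no growing strings.
-- outside the precondition, e.g. on path_d_rec('A', 991): A returns 1, B returns 1; on path_d_rec('A', 996): A returns 1, B returns 1
import Mathlib
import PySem

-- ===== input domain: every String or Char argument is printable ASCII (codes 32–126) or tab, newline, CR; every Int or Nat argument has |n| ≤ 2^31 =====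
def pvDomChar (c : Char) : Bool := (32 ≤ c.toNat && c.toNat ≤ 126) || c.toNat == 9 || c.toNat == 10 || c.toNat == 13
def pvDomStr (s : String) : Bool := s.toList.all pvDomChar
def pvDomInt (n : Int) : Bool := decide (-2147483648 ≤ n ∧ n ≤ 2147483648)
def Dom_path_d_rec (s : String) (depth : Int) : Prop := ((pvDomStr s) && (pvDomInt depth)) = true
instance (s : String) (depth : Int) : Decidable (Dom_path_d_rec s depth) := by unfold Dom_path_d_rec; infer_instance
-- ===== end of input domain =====

-- B replaces A's top-down memoized recursion by a bottom-up DP over a 25-entry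
-- per-transition cost table iterated depth-1 times (alternative decomposition, same results).


-- ===== PORT A =====
def pvDLocs : PySem.Dict Char (Int × Int) :=
  PySem.Dict.ofList [('^', (1, 0)), ('A', (2, 0)), ('<', (0, 1)), ('v', (1, 1)), ('>', (2, 1))]

-- travel_d; Pre_ keeps both characters on the keypad where Python would raise KeyError, so
-- the default (0,0) of getD is never what the claim is about
def pvTravel (c t : Char) : List Char :=
  let p := pvDLocs.getD c (0, 0)
  let q := pvDLocs.getD t (0, 0)
  let r := List.replicate (max 0 (q.1 - p.1)).toNat '>'
  let d := List.replicate (max 0 (q.2 - p.2)).toNat 'v'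
  let u := List.replicate (max 0 (p.2 - q.2)).toNat '^'
  let l := List.replicate (max 0 (p.1 - q.1)).toNat '<'
  (if q.1 > 0 ∨ p.2 > 0 then l ++ d else d ++ l) ++ (if p.1 > 0 then u ++ r else r ++ u)

-- A's recursion, with the memo dict MEM threaded through (globally it starts empty;
-- memoization does not change the returned values). Depth is carried as the Nat
-- depth.toNat, faithful on the inputs Pre_ admits (depth ≥ 0).
mutual
  -- the 'for t in s' loop of path_d_rec at Python depth d'+1: state (c, length, MEM)
  def pvAStep (d' : Nat) (s : List Char) (c : Char) (len : Int)
      (m : PySem.Dict (Char × Char × Nat) Int) : Int × PySem.Dict (Char × Char × Nat) Int :=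
    match s with
    | [] => (len, m)
    | t :: rest =>
      match m.get? (c, t, d' + 1) with
      | some v => pvAStep d' rest t (len + v) m
      | none =>
        let sub := pvATop d' (pvTravel c t ++ ['A']) m
        pvAStep d' rest t (len + sub.1) (sub.2.insert (c, t, d' + 1) sub.1)
  termination_by (d' + 1, s.length, 0)

  -- path_d_rec itself (depth as Nat, memo threaded)
  def pvATop (d : Nat) (s : List Char)
      (m : PySem.Dict (Char × Char × Nat) Int) : Int × PySem.Dict (Char × Char × Nat) Int :=
    match d with
    | 0 => (PySem.List.len s, m)
    | d' + 1 => pvAStep d' s 'A' 0 m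
  termination_by (d, s.length, 1)
end

def path_d_rec (s : String) (depth : Int) : Int :=
  (pvATop depth.toNat s.toList PySem.Dict.empty).1

-- ===== PORT B =====
def pvKeysL : List Char := ['^', 'A', '<', 'v', '>']

-- the dict comprehension {(c, t): f(c, t) for c in KEYS for t in KEYS}
def pvBuild (f : Char → Char → Int) : PySem.Dict (Char × Char) Int :=
  pvKeysL.foldl (fun d c => pvKeysL.foldl (fun d t => d.insert (c, t) (f c t)) d) PySem.Dict.empty

-- cost = {(c, t): len(travel_d(c, t)) + 1 ...}
def pvCost1 : PySem.Dict (Char × Char) Int :=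
  pvBuild (fun c t => PySem.List.len (pvTravel c t) + 1)

-- one refinement step of the table
def pvStepB (cost : PySem.Dict (Char × Char) Int) : PySem.Dict (Char × Char) Int :=
  pvBuild (fun c t =>
    let w := pvTravel c t ++ ['A']
    ((('A' :: w).zip w).map (fun p => cost.getD p 0)).sum)

-- 'for _ in range(depth - 1)'
def pvIterB : Nat → PySem.Dict (Char × Char) Int → PySem.Dict (Char × Char) Int
  | 0, cost => cost
  | k + 1, cost => pvIterB k (pvStepB cost)

def path_d_rec_alt (s : String) (depth : Int) : Int :=
  if depth = 0 then PySem.Str.len s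
  else
    let cost := pvIterB (depth - 1).toNat pvCost1
    ((('A' :: s.toList).zip s.toList).map (fun p => cost.getD p 0)).sum

-- ===== PRECONDITION & SPEC =====
-- Pre_ excludes exactly the inputs on which A raises: negative depth (A recurses forever:
-- RecursionError); characters off the keypad when depth ≠ 0 (KeyError); and, for nonempty s,
-- depth > 990 — A's recursion is depth-deep and hits CPython's default recursion limit of
-- 1000 (measured: RecursionError from depth 997 when called from top level); the bound 990
-- leaves a few frames of margin for the caller's stack, so a handful of returning inputs
-- (e.g. ('A', 991) and ('A', 996), on which A and B both return 1) fall outside it.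
def Pre_path_d_rec (s : String) (depth : Int) : Prop :=
  0 ≤ depth ∧ (depth = 0 ∨
    ((s.toList.all fun c => (['^', 'A', '<', 'v', '>'] : List Char).contains c) = true ∧
      (s.toList = [] ∨ depth ≤ 990)))
instance (s : String) (depth : Int) : Decidable (Pre_path_d_rec s depth) := by
  unfold Pre_path_d_rec; infer_instance

def pvWitness_path_d_rec : String × Int := ("<Av", 3)

def Spec_path_d_rec (s : String) (depth : Int) (out : Int) : Prop := out = path_d_rec_alt s depth
instance (s : String) (depth : Int) (out : Int) : Decidable (Spec_path_d_rec s depth out) := by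
  unfold Spec_path_d_rec; infer_instance

-- ===== CLAIM (what is proved, stated in full; the proofs are below) =====
def Claim_equal_path_d_rec : Prop := ∀ (s : String) (depth : Int),
  Dom_path_d_rec s depth → Pre_path_d_rec s depth → Spec_path_d_rec s depth (path_d_rec s depth)

-- ===== LEMMAS AND PROOFS =====

-- the common value both programs compute: expansion length, defined purely
def pvF : Nat → List Char → Int
  | 0, s => (s.length : Int)
  | d + 1, s => ((('A' :: s).zip s).map (fun p => pvF d (pvTravel p.1 p.2 ++ ['A']))).sum

-- partial sums of pvF over the transitions of s starting from character c
def pvSum (d : Nat) (c : Char) (s : List Char) : Int :=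
  (((c :: s).zip s).map (fun p => pvF d (pvTravel p.1 p.2 ++ ['A']))).sum

theorem pvSum_nil (d : Nat) (c : Char) : pvSum d c [] = 0 := rfl

theorem pvSum_cons (d : Nat) (c t : Char) (rest : List Char) :
    pvSum d c (t :: rest) = pvF d (pvTravel c t ++ ['A']) + pvSum d t rest := by
  simp [pvSum, List.zip]

theorem pvF_succ (d : Nat) (s : List Char) : pvF (d + 1) s = pvSum d 'A' s := rfl

-- every entry the memo can hold is the pure value
def pvGood (m : PySem.Dict (Char × Char × Nat) Int) : Prop :=
  ∀ c t d v, m.get? (c, t, d + 1) = some v → v = pvF d (pvTravel c t ++ ['A'])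

theorem pvGood_empty : pvGood PySem.Dict.empty := by
  intro c t d v h
  simp [PySem.Dict.get?_empty] at h

theorem pvGood_insert {m : PySem.Dict (Char × Char × Nat) Int} (hm : pvGood m)
    (c t : Char) (d : Nat) :
    pvGood (m.insert (c, t, d + 1) (pvF d (pvTravel c t ++ ['A']))) := by
  intro c' t' d' v h
  rw [PySem.Dict.get?_insert] at h
  split at h
  · next heq =>
    have hv := Option.some.inj h
    obtain ⟨rfl, rfl, hd⟩ : c' = c ∧ t' = t ∧ d' + 1 = d + 1 := by
      simpa [Prod.ext_iff] using heq
    obtain rfl : d' = d := by omega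
    exact hv.symm
  · exact hm c' t' d' v h

theorem pvAStep_spec (d' : Nat)
    (IH : ∀ s m, pvGood m → (pvATop d' s m).1 = pvF d' s ∧ pvGood (pvATop d' s m).2) :
    ∀ s c len m, pvGood m →
      (pvAStep d' s c len m).1 = len + pvSum d' c s ∧ pvGood (pvAStep d' s c len m).2 := by
  intro s
  induction s with
  | nil => intro c len m hm; simp [pvAStep, pvSum_nil, hm]
  | cons t rest ih =>
    intro c len m hm
    rw [pvAStep]
    cases hget : m.get? (c, t, d' + 1) with
    | some v =>
      have hv := hm c t d' v hget
      have := ih t (len + v) m hm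
      rw [pvSum_cons]
      constructor
      · rw [this.1, hv]; ring
      · exact this.2
    | none =>
      have htop := IH (pvTravel c t ++ ['A']) m hm
      have hins : pvGood ((pvATop d' (pvTravel c t ++ ['A']) m).2.insert (c, t, d' + 1)
          (pvATop d' (pvTravel c t ++ ['A']) m).1) := by
        rw [htop.1]; exact pvGood_insert htop.2 c t d'
      have := ih t (len + (pvATop d' (pvTravel c t ++ ['A']) m).1) _ hins
      rw [pvSum_cons]
      constructor
      · rw [this.1, htop.1]; ring
      · exact this.2

theorem pvATop_spec : ∀ (d : Nat) (s : List Char) m, pvGood m →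
    (pvATop d s m).1 = pvF d s ∧ pvGood (pvATop d s m).2 := by
  intro d
  induction d with
  | zero => intro s m hm; simp [pvATop, pvF, PySem.List.len_eq, hm]
  | succ d' ih =>
    intro s m hm
    rw [pvATop]
    have := pvAStep_spec d' ih s 'A' 0 m hm
    rw [pvF_succ]
    exact ⟨by rw [this.1]; ring, this.2⟩

-- B side: the table built by pvBuild holds f at every keypad pair
theorem pvBuild_inner (f : Char → Char → Int) (c' : Char) :
    ∀ (l : List Char) (d : PySem.Dict (Char × Char) Int) (c t : Char),
      (l.foldl (fun d t' => d.insert (c', t') (f c' t')) d).getD (c, t) 0 =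
        if c = c' ∧ t ∈ l then f c t else d.getD (c, t) 0 := by
  intro l
  induction l with
  | nil => intro d c t; simp
  | cons t' rest ih =>
    intro d c t
    rw [List.foldl_cons, ih]
    rw [PySem.Dict.getD_insert]
    by_cases hc : c = c'
    · subst hc
      by_cases ht : t ∈ rest
      · simp [ht]
      · by_cases ht' : t = t' <;> simp [ht, ht']
    · simp [hc]

theorem pvBuild_outer (f : Char → Char → Int) :
    ∀ (l : List Char) (d : PySem.Dict (Char × Char) Int) (c t : Char), t ∈ pvKeysL →
      (l.foldl (fun d c => pvKeysL.foldl (fun d t => d.insert (c, t) (f c t)) d) d).getD (c, t) 0 =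
        if c ∈ l then f c t else d.getD (c, t) 0 := by
  intro l
  induction l with
  | nil => intro d c t ht; simp
  | cons c' rest ih =>
    intro d c t ht
    rw [List.foldl_cons, ih _ _ _ ht, pvBuild_inner]
    by_cases hc : c ∈ rest
    · simp [hc]
    · by_cases hc' : c = c' <;> simp [hc, hc', ht]

theorem pvBuild_getD (f : Char → Char → Int) (c t : Char) (hc : c ∈ pvKeysL)
    (ht : t ∈ pvKeysL) : (pvBuild f).getD (c, t) 0 = f c t := by
  rw [pvBuild, pvBuild_outer f pvKeysL PySem.Dict.empty c t ht]
  simp [hc]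

-- travel_d only emits keypad characters (25 concrete pairs)
theorem pvTravel_keys (c t : Char) : ∀ x ∈ pvTravel c t, x ∈ pvKeysL := by
  intro x hx
  simp only [pvTravel] at hx
  rcases List.mem_append.mp hx with h | h <;>
    (split at h <;> rcases List.mem_append.mp h with h | h <;>
      (rw [List.eq_of_mem_replicate h]; decide))

-- the invariant the DP loop maintains
def pvInv (k : Nat) (cost : PySem.Dict (Char × Char) Int) : Prop :=
  ∀ c t, c ∈ pvKeysL → t ∈ pvKeysL → cost.getD (c, t) 0 = pvF k (pvTravel c t ++ ['A'])

theorem pvInv_cost1 : pvInv 0 pvCost1 := by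
  intro c t hc ht
  rw [pvCost1, pvBuild_getD _ _ _ hc ht]
  simp [pvF, PySem.List.len_eq]

theorem pvSum_eq_getD (k : Nat) (cost : PySem.Dict (Char × Char) Int) (hinv : pvInv k cost) :
    ∀ (s : List Char) (c : Char), c ∈ pvKeysL → (∀ x ∈ s, x ∈ pvKeysL) →
      ((( c :: s).zip s).map (fun p => cost.getD p 0)).sum = pvSum k c s := by
  intro s c hc hs
  unfold pvSum
  congr 1
  apply List.map_congr_left
  intro p hp
  obtain ⟨h1, h2⟩ := List.of_mem_zip hp
  have hp1 : p.1 ∈ pvKeysL := by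
    rcases List.mem_cons.mp h1 with h | h
    · rw [h]; exact hc
    · exact hs _ h
  exact hinv p.1 p.2 hp1 (hs _ h2)

theorem pvInv_step {k : Nat} {cost : PySem.Dict (Char × Char) Int} (hinv : pvInv k cost) :
    pvInv (k + 1) (pvStepB cost) := by
  intro c t hc ht
  rw [pvStepB, pvBuild_getD _ _ _ hc ht]
  have hw : ∀ x ∈ pvTravel c t ++ ['A'], x ∈ pvKeysL := by
    intro x hx
    rcases List.mem_append.mp hx with h | h
    · exact pvTravel_keys c t x h
    · simp at h; rw [h]; decide
  show ((('A' :: (pvTravel c t ++ ['A'])).zip (pvTravel c t ++ ['A'])).map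
      (fun p => cost.getD p 0)).sum = pvF (k + 1) (pvTravel c t ++ ['A'])
  rw [pvSum_eq_getD k cost hinv _ 'A' (by decide) hw, pvF_succ]

theorem pvInv_iter : ∀ (n k : Nat) (cost : PySem.Dict (Char × Char) Int),
    pvInv k cost → pvInv (k + n) (pvIterB n cost) := by
  intro n
  induction n with
  | zero => intro k cost h; simpa using h
  | succ n ih =>
    intro k cost h
    rw [pvIterB]
    have := ih (k + 1) (pvStepB cost) (pvInv_step h)
    have heq : k + 1 + n = k + (n + 1) := by omega
    rwa [heq] at this

-- ===== VERDICT (by name: the statement is the Claim_ definition above) =====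
theorem path_d_rec_spec : Claim_equal_path_d_rec := by
  intro s depth _hdom hpre
  unfold Spec_path_d_rec
  obtain ⟨hd0, hrest⟩ := hpre
  rw [path_d_rec]
  by_cases h0 : depth = 0
  · subst h0
    simp [pvATop, path_d_rec_alt, PySem.Str.len, PySem.List.len_eq]
  · have hd1 : 1 ≤ depth := by omega
    rcases hrest with h | ⟨hcs, _⟩
    · exact absurd h h0
    · have hcs' : ∀ x ∈ s.toList, x ∈ pvKeysL := by
        intro x hx
        have := List.all_eq_true.mp hcs x hx
        simpa [pvKeysL] using this
      have hto : depth.toNat = (depth - 1).toNat + 1 := by omega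
      rw [hto]
      rw [(pvATop_spec ((depth - 1).toNat + 1) s.toList PySem.Dict.empty pvGood_empty).1]
      rw [path_d_rec_alt, if_neg h0]
      have hinv := pvInv_iter (depth - 1).toNat 0 pvCost1 pvInv_cost1
      rw [Nat.zero_add] at hinv
      rw [pvSum_eq_getD _ _ hinv s.toList 'A' (by decide) hcs', pvF_succ]
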